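-- pv_equiv track=rewrite | github.com/GOPIVARDHAN1965/resumes | resume-generator/app.py | _cluster_jds_by_role
-- ===== SOURCE A (Python) =====
-- def _cluster_jds_by_role(apps):
--     role_keywords = {
--         "BI Developer": {"power bi", "dashboard", "dax", "semantic model", "reporting", "kpi", "bi"},
--         "Data Analyst": {"data analysis", "sql", "excel", "visualization", "analytics", "statistical"},
--         "Data Engineer": {"etl", "pipeline", "data pipeline", "airflow", "spark", "data warehouse", "ingestion"},
--         "Finance Analyst": {"financial", "budget", "forecasting", "ap/ar", "accounting", "variance", "reconciliation"},
--         "ML Engineer": {"machine learning", "ml", "pytorch", "tensorflow", "model", "nlp", "training"},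
--         "Software Engineer": {"api", "backend", "frontend", "rest", "flask", "javascript", "software"},
--     }
--
--     clusters = {role: [] for role in role_keywords}
--     clusters["Other"] = []
--
--     for app in apps:
--         jd = (app.get("job_description") or app.get("jd_text") or "").lower()
--         best_role = app.get("role_type") or "Other"
--         if best_role == "Other":
--             best_score = 0
--             for role, keywords in role_keywords.items():
--                 score = sum(1 for kw in keywords if kw in jd)
--                 if score > best_score:
--                     best_score = score
--                     best_role = role
--         clusters[best_role].append(app)
--
--     return {k: v for k, v in clusters.items() if v}
-- ===== SOURCE B (Python) =====
-- ROLE_KEYWORDS = [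
--     ("BI Developer", ["power bi", "dashboard", "dax", "semantic model", "reporting", "kpi", "bi"]),
--     ("Data Analyst", ["data analysis", "sql", "excel", "visualization", "analytics", "statistical"]),
--     ("Data Engineer", ["etl", "pipeline", "data pipeline", "airflow", "spark", "data warehouse", "ingestion"]),
--     ("Finance Analyst", ["financial", "budget", "forecasting", "ap/ar", "accounting", "variance", "reconciliation"]),
--     ("ML Engineer", ["machine learning", "ml", "pytorch", "tensorflow", "model", "nlp", "training"]),
--     ("Software Engineer", ["api", "backend", "frontend", "rest", "flask", "javascript", "software"]),
-- ]
--
--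
-- def _role_of(app):
--     role = app.get("role_type") or "Other"
--     if role != "Other":
--         return role
--     jd = (app.get("job_description") or app.get("jd_text") or "").lower()
--     scores = [(r, sum(1 for kw in kws if kw in jd)) for r, kws in ROLE_KEYWORDS]
--     best = max(s for _, s in scores)
--     if best > 0:
--         return next(r for r, s in scores if s == best)
--     return "Other"
--
--
-- def _cluster_jds_by_role(apps):
--     labeled = [(_role_of(app), app) for app in apps]
--     order = [r for r, _ in ROLE_KEYWORDS] + ["Other"]
--     result = {}
--     for role in order:
--         group = [a for r, a in labeled if r == role]
--         if group:
--             result[role] = group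
--     return result
-- ===== Notes on version B (the rewrite author's own statement) =====
-- stated objective: alternative
-- what changed: A accumulates apps into a pre-initialised mutable clusters dict via a running-best fold per app and filters empty buckets at the end; B is a pure two-phase pipeline: it labels every app with a role computed from a full score table (max, then first argmax), then builds the output by grouping the labeled list per role in the fixed role order, keeping only nonempty groups.
import Mathlib
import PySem

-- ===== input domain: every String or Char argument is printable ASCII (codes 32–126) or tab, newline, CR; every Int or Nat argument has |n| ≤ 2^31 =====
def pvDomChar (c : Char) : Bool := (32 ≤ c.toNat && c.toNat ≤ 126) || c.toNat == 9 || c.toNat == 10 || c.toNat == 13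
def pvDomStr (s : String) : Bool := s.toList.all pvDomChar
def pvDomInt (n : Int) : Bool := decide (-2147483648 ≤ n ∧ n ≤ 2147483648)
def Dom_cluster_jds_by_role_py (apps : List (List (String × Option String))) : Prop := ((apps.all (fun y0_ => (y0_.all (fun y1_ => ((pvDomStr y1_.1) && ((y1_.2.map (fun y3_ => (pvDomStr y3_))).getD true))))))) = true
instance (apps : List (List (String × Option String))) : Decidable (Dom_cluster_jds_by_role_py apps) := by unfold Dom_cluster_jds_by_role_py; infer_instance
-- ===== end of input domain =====

-- B replaces A's mutable-clusters loop (running-best fold per app, dict appended in place, empties filtered at the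
-- end) by a pure label-then-group-by pass (score table + max + first argmax per app); same return value, not faster.

-- ===== PORT A =====
-- shared with port B (both Pythons compute these identically): dict lookup, Python `or` falsiness, jd, keyword score
def pvGet (app : List (String × Option String)) (k : String) : Option String :=
  match app.find? (fun p => p.1 = k) with
  | some (_, some s) => some s
  | _ => none

def pvOr (o : Option String) (d : String) : String :=
  match o with
  | some s => if s = "" then d else s
  | none => d

def pvRoleKeywords : List (String × List String) :=
  [("BI Developer", ["power bi", "dashboard", "dax", "semantic model", "reporting", "kpi", "bi"]),
   ("Data Analyst", ["data analysis", "sql", "excel", "visualization", "analytics", "statistical"]),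
   ("Data Engineer", ["etl", "pipeline", "data pipeline", "airflow", "spark", "data warehouse", "ingestion"]),
   ("Finance Analyst", ["financial", "budget", "forecasting", "ap/ar", "accounting", "variance", "reconciliation"]),
   ("ML Engineer", ["machine learning", "ml", "pytorch", "tensorflow", "model", "nlp", "training"]),
   ("Software Engineer", ["api", "backend", "frontend", "rest", "flask", "javascript", "software"])]

def pvJd (app : List (String × Option String)) : String :=
  PySem.Str.lower (pvOr (pvGet app "job_description") (pvOr (pvGet app "jd_text") ""))

def pvScore (jd : String) (kws : List String) : Int :=
  (kws.map (fun kw => if PySem.Str.isIn kw jd then (1 : Int) else 0)).sum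

-- A's inner loop: running (best_score, best_role) with strict `>`
def pvBestRoleA (app : List (String × Option String)) : String :=
  let jd := pvJd app
  let rt := pvOr (pvGet app "role_type") "Other"
  if rt = "Other" then
    (pvRoleKeywords.foldl
      (fun (st : Int × String) rk => if st.1 < pvScore jd rk.2 then (pvScore jd rk.2, rk.1) else st)
      (0, "Other")).2
  else rt

def pvInitClusters : PySem.Dict String (List (List (String × Option String))) :=
  (pvRoleKeywords.foldl (fun d rk => d.insert rk.1 []) PySem.Dict.empty).insert "Other" []

def cluster_jds_by_role_py (apps : List (List (String × Option String))) :
    List (String × List (List (String × Option String))) :=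
  let clusters := apps.foldl (fun d app => d.modify (pvBestRoleA app) [] (fun v => v ++ [app])) pvInitClusters
  clusters.items.filter (fun p => !p.2.isEmpty)

-- ===== PORT B =====
def pvScoreTable (jd : String) : List (String × Int) :=
  pvRoleKeywords.map (fun rk => (rk.1, pvScore jd rk.2))

-- B's _role_of: full score table, then max, then first argmax
def pvRoleOfB (app : List (String × Option String)) : String :=
  let rt := pvOr (pvGet app "role_type") "Other"
  if rt ≠ "Other" then rt
  else
    let jd := pvJd app
    let scores := pvScoreTable jd
    let best := (PySem.List.max? (scores.map Prod.snd) id).getD 0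
    if 0 < best then ((scores.find? (fun p => p.2 = best)).map Prod.fst).getD "Other"
    else "Other"

def cluster_jds_by_role_py_alt (apps : List (List (String × Option String))) :
    List (String × List (List (String × Option String))) :=
  let labeled := apps.map (fun app => (pvRoleOfB app, app))
  let order := pvRoleKeywords.map Prod.fst ++ ["Other"]
  order.filterMap (fun r =>
    let g := ((labeled.filter (fun p => p.1 = r)).map Prod.snd)
    if g.isEmpty then none else some (r, g))

-- ===== PRECONDITION & SPEC =====
-- Pre_ excludes apps carrying a truthy "role_type" outside the seven cluster names: there A raises KeyError
-- (clusters[best_role] on a missing key), so A returns no value.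
def Pre_cluster_jds_by_role_py (apps : List (List (String × Option String))) : Prop :=
  ∀ app ∈ apps, pvOr (pvGet app "role_type") "Other" ∈ (pvRoleKeywords.map Prod.fst ++ ["Other"])
instance (apps : List (List (String × Option String))) : Decidable (Pre_cluster_jds_by_role_py apps) := by
  unfold Pre_cluster_jds_by_role_py; infer_instance

def pvWitness_cluster_jds_by_role_py : (List (List (String × Option String))) :=
  [[("role_type", some "ML Engineer")], [("jd_text", some "SQL and Excel analytics")]]

def Spec_cluster_jds_by_role_py (apps : List (List (String × Option String))) (out : List (String × List (List (String × Option String)))) : Prop := out = cluster_jds_by_role_py_alt apps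
instance (apps : List (List (String × Option String))) (out : List (String × List (List (String × Option String)))) : Decidable (Spec_cluster_jds_by_role_py apps out) := by unfold Spec_cluster_jds_by_role_py; infer_instance

-- ===== CLAIM (what is proved, stated in full; the proofs are below) =====
def Claim_equal_cluster_jds_by_role_py : Prop := ∀ (apps : List (List (String × Option String))), Dom_cluster_jds_by_role_py apps → Pre_cluster_jds_by_role_py apps → Spec_cluster_jds_by_role_py apps (cluster_jds_by_role_py apps)

-- ===== LEMMAS AND PROOFS =====

theorem selA_spec (l : List (String × Int)) : ∀ (b : Int) (r : String),
    l.foldl (fun (st : Int × String) p => if st.1 < p.2 then (p.2, p.1) else st) (b, r) =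
      ((l.map Prod.snd).foldl max b,
        if b < (l.map Prod.snd).foldl max b then
          ((l.find? (fun p => p.2 = (l.map Prod.snd).foldl max b)).map Prod.fst).getD r
        else r) := by
  induction l with
  | nil => intro b r; simp
  | cons x t ih =>
    intro b r
    have hM : ((x :: t).map Prod.snd).foldl max b = (t.map Prod.snd).foldl max (max b x.2) := by
      simp [List.foldl_cons]
    by_cases hb : b < x.2
    · have hmax : max b x.2 = x.2 := by omega
      have hxle : x.2 ≤ (t.map Prod.snd).foldl max x.2 := (PySem.List.le_foldl_max _ _).1
      simp only [List.foldl_cons, hb, if_pos hb, hM, hmax, ih]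
      by_cases hx : x.2 = (t.map Prod.snd).foldl max x.2
      · simp [← hx]
        intro h; exact absurd hb (by omega)
      · have hlt : x.2 < (t.map Prod.snd).foldl max x.2 := lt_of_le_of_ne hxle hx
        have hmem : (t.map Prod.snd).foldl max x.2 ∈ t.map Prod.snd := by
          rcases PySem.List.foldl_max_mem (t.map Prod.snd) x.2 with h | h
          · omega
          · exact h
        have hsome : (t.find? (fun p => p.2 = (t.map Prod.snd).foldl max x.2)).isSome := by
          rw [List.find?_isSome]
          rcases List.mem_map.mp hmem with ⟨p, hp, hpe⟩
          exact ⟨p, hp, by simp [hpe]⟩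
        rcases Option.isSome_iff_exists.mp hsome with ⟨p, hp⟩
        simp [List.find?_cons, hx, hlt, if_pos (lt_of_lt_of_le hb hxle), hp, lt_of_lt_of_le hb hxle]
    · have hmax : max b x.2 = b := by omega
      simp only [List.foldl_cons, if_neg hb, hM, hmax, ih]
      by_cases hc : b < (t.map Prod.snd).foldl max b
      · have hx : ¬ (x.2 = (t.map Prod.snd).foldl max b) := by omega
        simp [List.find?_cons, hx, hc]
      · simp [hc]

theorem max?_cons_int : ∀ (t : List Int) (x : Int), PySem.List.max? (x :: t) id = some (t.foldl max x) := by
  intro t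
  induction t with
  | nil => intro x; simp [PySem.List.max?]
  | cons y t ih =>
    intro x
    have hL : PySem.List.max? (x :: y :: t) id = PySem.List.max? (max x y :: t) id := by
      by_cases h : x < y
      · have hm : max x y = y := by omega
        simp [PySem.List.max?, hm, h]
      · have hm : max x y = x := by omega
        simp [PySem.List.max?, hm, h]
    rw [hL, ih]
    simp [List.foldl_cons]

theorem pvScore_nonneg (jd : String) (kws : List String) : 0 ≤ pvScore jd kws := by
  rw [pvScore, PySem.List.sum_map_ite_one_zero]
  exact_mod_cast Nat.zero_le _

theorem sel_eq_generic (l : List (String × Int)) (hne : l ≠ []) (hnn : ∀ p ∈ l, 0 ≤ p.2) (o : String) :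
    (l.foldl (fun (st : Int × String) p => if st.1 < p.2 then (p.2, p.1) else st) (0, o)).2 =
      (if 0 < (PySem.List.max? (l.map Prod.snd) id).getD 0 then
        ((l.find? (fun p => p.2 = (PySem.List.max? (l.map Prod.snd) id).getD 0)).map Prod.fst).getD o
      else o) := by
  match l, hne with
  | x :: t, _ =>
    have hx : 0 ≤ x.2 := hnn x (by simp)
    have hmax : max 0 x.2 = x.2 := by omega
    rw [selA_spec]
    simp only [List.map_cons, max?_cons_int, Option.getD_some, List.foldl_cons, hmax]

theorem roleOf_eq (app : List (String × Option String)) : pvBestRoleA app = pvRoleOfB app := by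
  unfold pvBestRoleA pvRoleOfB
  by_cases h : pvOr (pvGet app "role_type") "Other" = "Other"
  · simp only [h, if_pos rfl, ite_not, if_pos rfl]
    have hfold : pvRoleKeywords.foldl
        (fun (st : Int × String) rk => if st.1 < pvScore (pvJd app) rk.2 then (pvScore (pvJd app) rk.2, rk.1) else st)
        (0, "Other")
        = (pvScoreTable (pvJd app)).foldl (fun (st : Int × String) p => if st.1 < p.2 then (p.2, p.1) else st) (0, "Other") := by
      rw [pvScoreTable, List.foldl_map]
    rw [hfold, sel_eq_generic]
    · simp [pvScoreTable, pvRoleKeywords]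
    · intro p hp
      rw [pvScoreTable] at hp
      rcases List.mem_map.mp hp with ⟨rk, _, hrk⟩
      rw [← hrk]
      exact pvScore_nonneg _ _
  · simp [h]

theorem get?_mk_map (ks : List String) (g : String → List (List (String × Option String)))
    (k : String) (hk : k ∈ ks) :
    (PySem.Dict.mk (ks.map (fun r => (r, g r)))).get? k = some (g k) := by
  induction ks with
  | nil => cases hk
  | cons a t ih =>
    simp only [List.map_cons, PySem.Dict.get?_mk_cons]
    by_cases h : a = k
    · simp [h]
    · simp only [beq_iff_eq, h, if_neg h, if_false]
      exact ih ((List.mem_cons.mp hk).resolve_left (fun he => h he.symm))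

theorem insert_mk_map (ks : List String) (g : String → List (List (String × Option String)))
    (k : String) (hk : k ∈ ks) (v : List (List (String × Option String))) :
    (PySem.Dict.mk (ks.map (fun r => (r, g r)))).insert k v
      = PySem.Dict.mk (ks.map (fun r => (r, if r = k then v else g r))) := by
  have hc : (PySem.Dict.mk (ks.map (fun r => (r, g r)))).contains k = true := by
    rw [PySem.Dict.contains_mk]
    simp only [List.any_eq_true]
    exact ⟨(k, g k), List.mem_map.mpr ⟨k, hk, rfl⟩, by simp⟩
  apply PySem.Dict.ext
  rw [PySem.Dict.items_insert_of_contains _ _ hc]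
  show (ks.map (fun r => (r, g r))).map _ = _
  rw [List.map_map]
  apply List.map_congr_left
  intro r _
  by_cases h : r = k
  · simp [h]
  · simp [h]

theorem foldl_modify_items (ks : List String)
    (f : List (String × Option String) → String)
    (l : List (List (String × Option String)))
    (hl : ∀ a ∈ l, f a ∈ ks) :
    ∀ g : String → List (List (String × Option String)),
    (l.foldl (fun d a => d.modify (f a) [] (fun v => v ++ [a]))
        (PySem.Dict.mk (ks.map (fun r => (r, g r))))).items =
      ks.map (fun r => (r, g r ++ l.filter (fun a => f a = r))) := by
  induction l with
  | nil => intro g; simp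
  | cons a t ih =>
    intro g
    have hfa : f a ∈ ks := hl a (by simp)
    have hstep : (PySem.Dict.mk (ks.map (fun r => (r, g r)))).modify (f a) [] (fun v => v ++ [a])
        = PySem.Dict.mk (ks.map (fun r => (r, if r = f a then g (f a) ++ [a] else g r))) := by
      show (PySem.Dict.mk (ks.map (fun r => (r, g r)))).insert (f a) _ = _
      rw [PySem.Dict.getD_eq_get?_getD, get?_mk_map ks g (f a) hfa]
      exact insert_mk_map ks g (f a) hfa _
    rw [List.foldl_cons, hstep, ih (fun a' ha' => hl a' (by simp [ha']))]
    apply List.map_congr_left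
    intro r _
    by_cases h : r = f a
    · subst h
      simp [List.filter_cons]
    · have : ¬ (f a = r) := fun he => h he.symm
      simp [List.filter_cons, this, h]

theorem foldA_eq_table (jd : String) (init : Int × String) :
    pvRoleKeywords.foldl
        (fun (st : Int × String) rk => if st.1 < pvScore jd rk.2 then (pvScore jd rk.2, rk.1) else st) init
      = (pvScoreTable jd).foldl (fun (st : Int × String) p => if st.1 < p.2 then (p.2, p.1) else st) init := by
  rw [pvScoreTable, List.foldl_map]

theorem foldl_step_mem (l : List (String × Int)) : ∀ (b : Int) (r : String),
    (l.foldl (fun (st : Int × String) p => if st.1 < p.2 then (p.2, p.1) else st) (b, r)).2 = r ∨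
    (l.foldl (fun (st : Int × String) p => if st.1 < p.2 then (p.2, p.1) else st) (b, r)).2 ∈ l.map Prod.fst := by
  induction l with
  | nil => intro b r; simp
  | cons x t ih =>
    intro b r
    rw [List.foldl_cons]
    by_cases h : b < x.2
    · simp only [if_pos h]
      rcases ih x.2 x.1 with h' | h'
      · right; simp [h']
      · right; simp [h']
    · simp only [if_neg h]
      rcases ih b r with h' | h'
      · left; exact h'
      · right; simp [h']

theorem bestRoleA_mem (app : List (String × Option String))
    (h : pvOr (pvGet app "role_type") "Other" ∈ (pvRoleKeywords.map Prod.fst ++ ["Other"])) :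
    pvBestRoleA app ∈ (pvRoleKeywords.map Prod.fst ++ ["Other"]) := by
  unfold pvBestRoleA
  by_cases hrt : pvOr (pvGet app "role_type") "Other" = "Other"
  · simp only [hrt, if_pos rfl]
    rw [foldA_eq_table]
    rcases foldl_step_mem (pvScoreTable (pvJd app)) 0 "Other" with h' | h'
    · rw [h']; simp
    · rw [List.mem_append]
      left
      rw [pvScoreTable, List.map_map] at h'
      simpa using h'
  · simp only [if_neg hrt]
    exact h

theorem pvInit_eq : pvInitClusters
    = PySem.Dict.mk ((pvRoleKeywords.map Prod.fst ++ ["Other"]).map (fun r => (r, []))) := by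
  decide

theorem filter_eq_filterMap (ks : List String)
    (F : String → List (List (String × Option String))) :
    (ks.map (fun r => (r, F r))).filter (fun p => !p.2.isEmpty)
      = ks.filterMap (fun r => if (F r).isEmpty then none else some (r, F r)) := by
  induction ks with
  | nil => simp
  | cons a t ih =>
    rw [List.map_cons, List.filter_cons, List.filterMap_cons]
    by_cases h : (F a).isEmpty
    · simp [h, ih]
    · simp [h, ih]

theorem labeled_group (apps : List (List (String × Option String))) (r : String) :
    ((apps.map (fun a => (pvRoleOfB a, a))).filter (fun p => p.1 = r)).map Prod.snd
      = apps.filter (fun a => pvRoleOfB a = r) := by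
  rw [List.filter_map, List.map_map]
  have h1 : (Prod.snd ∘ fun a => (pvRoleOfB a, a)) = (id : List (String × Option String) → _) := rfl
  have h2 : ((fun (p : String × List (String × Option String)) => decide (p.1 = r)) ∘ fun a => (pvRoleOfB a, a)) = fun a => decide (pvRoleOfB a = r) := rfl
  rw [h1, h2, List.map_id]

theorem main_spec (apps : List (List (String × Option String)))
    (hpre : ∀ app ∈ apps, pvOr (pvGet app "role_type") "Other" ∈ (pvRoleKeywords.map Prod.fst ++ ["Other"])) :
    cluster_jds_by_role_py apps = cluster_jds_by_role_py_alt apps := by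
  unfold cluster_jds_by_role_py cluster_jds_by_role_py_alt
  simp only [pvInit_eq,
    foldl_modify_items (pvRoleKeywords.map Prod.fst ++ ["Other"]) pvRoleOfB apps
      (fun a ha => roleOf_eq a ▸ bestRoleA_mem a (hpre a ha)) (fun _ => []),
    List.nil_append, labeled_group, roleOf_eq]
  exact filter_eq_filterMap _ _

-- ===== VERDICT (by name: the statement is the Claim_ definition above) =====
theorem cluster_jds_by_role_py_spec : Claim_equal_cluster_jds_by_role_py := by
  intro apps _ hpre
  unfold Spec_cluster_jds_by_role_py
  exact main_spec apps hpre
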